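-- pv_equiv track=rewrite | github.com/TerminalRocketship45/AnswerClustering | lemon_agent/llm_client.py | _close_truncated_json
-- ===== SOURCE A (Python) =====
-- def _close_truncated_json(json_text: str) -> str:
--     in_string = False
--     escaped = False
--     stack: list[str] = []
--
--     for char in json_text:
--         if escaped:
--             escaped = False
--             continue
--         if char == "\\":
--             if in_string:
--                 escaped = True
--             continue
--         if char == '"':
--             in_string = not in_string
--             continue
--         if in_string:
--             continue
--         if char in "[{":
--             stack.append(char)
--         elif char == "]":
--             if stack and stack[-1] == "[":
--                 stack.pop()
--         elif char == "}":
--             if stack and stack[-1] == "{":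
--                 stack.pop()
--
--     fixed = json_text
--     if in_string:
--         fixed += '"'
--     for open_char in reversed(stack):
--         fixed += "]" if open_char == "[" else "}"
--     return fixed
-- ===== SOURCE B (Python) =====
-- def _close_truncated_json(json_text: str) -> str:
--     # Recursive-descent repair: one recursive frame per open bracket (the implicit
--     # call stack replaces A's explicit stack), strings skipped by a dedicated scanner.
--     n = len(json_text)
--     CLOSE = {"[": "]", "{": "}"}
--
--     def skip_string(i):
--         # i: first index after the opening quote; returns (index after the closing
--         # quote, False) or (end, True) when the string is truncated.
--         while i < n:
--             c = json_text[i]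
--             if c == "\\":
--                 i += 2          # an escaped character is consumed blindly
--             elif c == '"':
--                 return i + 1, False
--             else:
--                 i += 1
--         return i, True
--
--     def consume(i, opener):
--         # Parse from i inside bracket `opener` (None at top level); returns
--         # (index after the matching closer, "") on a match, or (end, suffix
--         # of closers needed, innermost first) if the text ends inside.
--         while i < n:
--             c = json_text[i]
--             i += 1
--             if c == '"':
--                 i, truncated = skip_string(i)
--                 if truncated:
--                     return n, '"' + (CLOSE[opener] if opener else "")
--             elif c in CLOSE:
--                 i, suffix = consume(i, c)
--                 if suffix:
--                     return n, suffix + (CLOSE[opener] if opener else "")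
--             elif c in "]}":
--                 if opener and c == CLOSE[opener]:
--                     return i, ""
--                 # a closer that does not match the innermost open bracket is ignored
--             # backslash outside a string and every other character: no effect
--         return n, CLOSE[opener] if opener else ""
--
--     return json_text + consume(0, None)[1]
-- ===== Notes on version B (the rewrite author's own statement) =====
-- stated objective: alternative
-- what changed: A's single iterative state machine with an explicit bracket stack is replaced by an index-based recursive-descent parser: one recursive call per open bracket (the call stack replaces the explicit stack list), a separate string-skipping scanner replaces the in_string/escaped flags, and the closer suffix is assembled as the recursion unwinds instead of by reversing a stack at the end.
import Mathlib
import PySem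

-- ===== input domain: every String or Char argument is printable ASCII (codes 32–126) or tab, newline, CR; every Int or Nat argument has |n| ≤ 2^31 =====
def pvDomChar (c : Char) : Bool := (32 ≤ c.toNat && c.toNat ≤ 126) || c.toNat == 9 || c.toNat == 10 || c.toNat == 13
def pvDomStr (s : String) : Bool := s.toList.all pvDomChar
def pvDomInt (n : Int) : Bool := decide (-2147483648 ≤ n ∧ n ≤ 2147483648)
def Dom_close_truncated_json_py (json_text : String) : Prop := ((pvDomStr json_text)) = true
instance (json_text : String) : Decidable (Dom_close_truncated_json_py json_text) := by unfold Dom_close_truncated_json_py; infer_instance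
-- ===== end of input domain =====

-- B replaces A's iterative state machine + explicit bracket stack by a recursive-descent
-- parser (one recursive frame per open bracket, a separate string-skipping scanner);
-- alternative structure, same linear cost.

-- ===== PORT A =====
-- A's loop state (in_string, escaped, stack); the stack is kept top-first (Python appends
-- at the end and iterates reversed(stack), which is exactly head-first order here).
def pvAStep (st : Bool × Bool × List Char) (c : Char) : Bool × Bool × List Char :=
  match st with
  | (in_string, escaped, stack) =>
    if escaped then (in_string, false, stack)
    else if c = '\\' then (in_string, if in_string then true else escaped, stack)
    else if c = '"' then (!in_string, escaped, stack)
    else if in_string then (in_string, escaped, stack)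
    else if c = '[' ∨ c = '{' then (in_string, escaped, c :: stack)
    else if c = ']' then
      (match stack with  -- 'if stack and stack[-1] == "[": stack.pop()'
       | t :: rest => if t = '[' then (in_string, escaped, rest) else (in_string, escaped, t :: rest)
       | [] => (in_string, escaped, []))
    else if c = '}' then
      (match stack with  -- 'if stack and stack[-1] == "{": stack.pop()'
       | t :: rest => if t = '{' then (in_string, escaped, rest) else (in_string, escaped, t :: rest)
       | [] => (in_string, escaped, []))
    else (in_string, escaped, stack)

def close_truncated_json_py (json_text : String) : String :=
  let st := json_text.toList.foldl pvAStep (false, false, [])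
  let fixed := if st.1 then json_text ++ "\"" else json_text
  st.2.2.foldl (fun acc c => acc ++ (if c = '[' then "]" else "}")) fixed

-- ===== PORT B =====
-- CLOSE[c] of Source B
def pvCloser (c : Char) : Char := if c = '[' then ']' else '}'

-- '(CLOSE[opener] if opener else "")' of Source B
def pvOwn (o : Option Char) : List Char :=
  match o with
  | none => []
  | some c => [pvCloser c]

-- Source B's skip_string on the remaining characters: (rest after the closing quote, truncated?)
def pvSkipString : List Char → List Char × Bool
  | [] => ([], true)
  | c :: rest =>
    if c = '\\' then
      match rest with          -- 'i += 2': the escaped character is consumed blindly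
      | [] => ([], true)
      | _ :: r => pvSkipString r
    else if c = '"' then (rest, false)
    else pvSkipString rest

-- needed by pvRec's termination proof (the scanner only consumes input)
theorem pvSkipString_len : ∀ l : List Char, (pvSkipString l).1.length ≤ l.length := by
  intro l
  induction l using pvSkipString.induct with
  | case1 => simp [pvSkipString.eq_def]
  | case2 => simp [pvSkipString.eq_def]
  | case3 x r ih =>
    have e : pvSkipString ('\\' :: x :: r) = pvSkipString r := by
      rw [pvSkipString.eq_def]; simp
    rw [e]; simp only [List.length_cons]; omega
  | case4 r =>
    have e : pvSkipString ('"' :: r) = (r, false) := by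
      rw [pvSkipString.eq_def]; simp
    rw [e]; simp
  | case5 c r h1 h2 ih =>
    have e : pvSkipString (c :: r) = pvSkipString r := by
      rw [pvSkipString.eq_def]; simp [h1, h2]
    rw [e]; simp only [List.length_cons]; omega

-- Source B's consume: recursion over the remaining characters; returns (remaining input
-- after the matching closer, needed closer suffix — [] exactly on a match).  The
-- subtype records that consume only consumes input (for termination).
def pvRec : (l : List Char) → (o : Option Char) → {r : List Char // r.length ≤ l.length} × List Char
  | [], o => (⟨[], Nat.le_refl _⟩, pvOwn o)
  | c :: rest, o =>
    if c = '"' then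
      let s := pvSkipString rest
      if s.2 then (⟨[], by simp⟩, '"' :: pvOwn o)
      else
        let r := pvRec s.1 o
        (⟨r.1.val, le_trans r.1.property (le_trans (pvSkipString_len rest) (Nat.le_succ _))⟩, r.2)
    else if c = '[' ∨ c = '{' then
      let inner := pvRec rest (some c)
      if inner.2 = [] then
        let r := pvRec inner.1.val o
        (⟨r.1.val, le_trans r.1.property (le_trans inner.1.property (Nat.le_succ _))⟩, r.2)
      else (⟨[], by simp⟩, inner.2 ++ pvOwn o)
    else if c = ']' ∨ c = '}' then
      if pvOwn o = [c] then (⟨rest, Nat.le_succ _⟩, [])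
      else  -- a closer that does not match the innermost open bracket is ignored
        let r := pvRec rest o
        (⟨r.1.val, le_trans r.1.property (Nat.le_succ _)⟩, r.2)
    else  -- backslash outside a string and every other character: no effect
      let r := pvRec rest o
      (⟨r.1.val, le_trans r.1.property (Nat.le_succ _)⟩, r.2)
termination_by l => l.length
decreasing_by
  · exact Nat.lt_succ_of_le (pvSkipString_len rest)
  · exact Nat.lt_succ_of_le (Nat.le_refl _)
  · exact Nat.lt_succ_of_le inner.1.property
  · exact Nat.lt_succ_of_le (Nat.le_refl _)
  · exact Nat.lt_succ_of_le (Nat.le_refl _)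

def close_truncated_json_py_alt (json_text : String) : String :=
  json_text ++ String.ofList (pvRec json_text.toList none).2

-- ===== PRECONDITION & SPEC =====
def Spec_close_truncated_json_py (json_text : String) (out : String) : Prop := out = close_truncated_json_py_alt json_text
instance (json_text : String) (out : String) : Decidable (Spec_close_truncated_json_py json_text out) := by unfold Spec_close_truncated_json_py; infer_instance

-- ===== CLAIM (what is proved, stated in full; the proofs are below) =====
def Claim_equal_close_truncated_json_py : Prop := ∀ (json_text : String), Dom_close_truncated_json_py json_text → Spec_close_truncated_json_py json_text (close_truncated_json_py json_text)

-- ===== LEMMAS AND PROOFS =====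

-- the closing suffix A's epilogue appends, as a list of chars
def pvSfx (t : Bool × Bool × List Char) : List Char :=
  (if t.1 then ['"'] else []) ++ t.2.2.map pvCloser

-- Source B's string scanner vs A's fold while in_string = true
theorem pv_skip_fold (l : List Char) (st : List Char) :
    ((pvSkipString l).2 = true →
       (l.foldl pvAStep (true, false, st)).1 = true ∧ (l.foldl pvAStep (true, false, st)).2.2 = st)
  ∧ ((pvSkipString l).2 = false →
       l.foldl pvAStep (true, false, st) = (pvSkipString l).1.foldl pvAStep (false, false, st)) := by
  induction l using pvSkipString.induct with
  | case1 => simp [pvSkipString.eq_def]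
  | case2 =>
    have s1 : pvAStep (true, false, st) '\\' = (true, true, st) := by simp [pvAStep]
    simp [pvSkipString.eq_def, List.foldl_cons, pvAStep]
  | case3 x r ih =>
    have e : pvSkipString ('\\' :: x :: r) = pvSkipString r := by
      rw [pvSkipString.eq_def]; simp
    have s1 : pvAStep (true, false, st) '\\' = (true, true, st) := by simp [pvAStep]
    have s2 : pvAStep (true, true, st) x = (true, false, st) := by simp [pvAStep]
    rw [e]; simp only [List.foldl_cons]; rw [s1, s2]; exact ih
  | case4 r =>
    have e : pvSkipString ('"' :: r) = (r, false) := by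
      rw [pvSkipString.eq_def]; simp
    have s1 : pvAStep (true, false, st) '"' = (false, false, st) := by simp [pvAStep]
    rw [e]; simp only [List.foldl_cons]; rw [s1]; simp
  | case5 c r h1 h2 ih =>
    have e : pvSkipString (c :: r) = pvSkipString r := by
      rw [pvSkipString.eq_def]; simp [h1, h2]
    have s1 : pvAStep (true, false, st) c = (true, false, st) := by simp [pvAStep, h1, h2]
    rw [e]; simp only [List.foldl_cons]; rw [s1]; exact ih

-- A's closing loop appends exactly the mapped closers.
theorem pvClosers_toList (stack : List Char) (acc : String) :
    (stack.foldl (fun acc c => acc ++ (if c = '[' then "]" else "}")) acc).toList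
      = acc.toList ++ stack.map pvCloser := by
  induction stack generalizing acc with
  | nil => simp
  | cons c l ih =>
    simp only [List.foldl_cons, List.map_cons]
    rw [ih]
    unfold pvCloser
    split <;> simp

-- one frame of B's consume vs A's fold with that frame's opener on top of the stack
theorem pv_Rsome : ∀ (n : ℕ) (l : List Char), l.length < n → ∀ (o : Char), (o = '[' ∨ o = '{') → ∀ (s : List Char),
    ((pvRec l (some o)).2 = [] →
       l.foldl pvAStep (false, false, o :: s) = (pvRec l (some o)).1.val.foldl pvAStep (false, false, s))
  ∧ ((pvRec l (some o)).2 ≠ [] →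
       pvSfx (l.foldl pvAStep (false, false, o :: s)) = (pvRec l (some o)).2 ++ s.map pvCloser) := by
  intro n
  induction n with
  | zero => intro l hl; omega
  | succ n ih =>
    intro l hl o ho s
    cases l with
    | nil =>
      constructor
      · intro h; rw [pvRec.eq_def] at h; simp [pvOwn] at h
      · intro _; rw [pvRec.eq_def]; simp [pvSfx, pvOwn]
    | cons c rest =>
      have hr : rest.length < n := by simp at hl; omega
      by_cases hq : c = '"'
      · subst hq
        have hstep : pvAStep (false, false, o :: s) '"' = (true, false, o :: s) := by
          simp [pvAStep]
        have hskf := pv_skip_fold rest (o :: s)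
        cases htr : (pvSkipString rest).2 with
        | true =>
          have h1 := hskf.1 htr
          constructor
          · intro h; rw [pvRec.eq_def] at h; simp [htr, pvOwn] at h
          · intro _
            rw [pvRec.eq_def]
            simp only [List.foldl_cons]
            rw [hstep]
            simp [htr, pvSfx, pvOwn, h1.1, h1.2]
        | false =>
          have h2 := hskf.2 htr
          have E1 : (pvRec ('"' :: rest) (some o)).1.val
              = (pvRec (pvSkipString rest).1 (some o)).1.val := by
            rw [pvRec.eq_def]; simp [htr]
          have E2 : (pvRec ('"' :: rest) (some o)).2
              = (pvRec (pvSkipString rest).1 (some o)).2 := by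
            rw [pvRec.eq_def]; simp [htr]
          have hs1 : (pvSkipString rest).1.length < n := by
            have := pvSkipString_len rest
            omega
          have IH := ih (pvSkipString rest).1 hs1 o ho s
          constructor
          · intro h
            rw [E2] at h
            rw [E1]
            simp only [List.foldl_cons]
            rw [hstep, h2]
            exact IH.1 h
          · intro h
            rw [E2] at h ⊢
            simp only [List.foldl_cons]
            rw [hstep, h2]
            exact IH.2 h
      · by_cases hb : c = '[' ∨ c = '{'
        · have hstep : pvAStep (false, false, o :: s) c = (false, false, c :: o :: s) := by
            rcases hb with h | h <;> subst h <;> simp [pvAStep]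
          by_cases hsuf : (pvRec rest (some c)).2 = []
          · have IHin := (ih rest hr c hb (o :: s)).1 hsuf
            have E1 : (pvRec (c :: rest) (some o)).1.val
                = (pvRec (pvRec rest (some c)).1.val (some o)).1.val := by
              rw [pvRec.eq_def]; simp [hq, hb, hsuf]
            have E2 : (pvRec (c :: rest) (some o)).2
                = (pvRec (pvRec rest (some c)).1.val (some o)).2 := by
              rw [pvRec.eq_def]; simp [hq, hb, hsuf]
            have hlen : (pvRec rest (some c)).1.val.length < n :=
              lt_of_le_of_lt (Nat.lt_succ_iff.mp (Nat.lt_succ_of_le (pvRec rest (some c)).1.property)) hr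
            have IH := ih _ hlen o ho s
            constructor
            · intro h
              rw [E2] at h
              rw [E1]
              simp only [List.foldl_cons]
              rw [hstep, IHin]
              exact IH.1 h
            · intro h
              rw [E2] at h ⊢
              simp only [List.foldl_cons]
              rw [hstep, IHin]
              exact IH.2 h
          · have IHin := (ih rest hr c hb (o :: s)).2 hsuf
            have E2 : (pvRec (c :: rest) (some o)).2
                = (pvRec rest (some c)).2 ++ pvOwn (some o) := by
              rw [pvRec.eq_def]; simp [hq, hb, hsuf]
            constructor
            · intro h
              rw [E2] at h
              simp [pvOwn] at h
            · intro _
              rw [E2]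
              simp only [List.foldl_cons]
              rw [hstep, IHin]
              simp [pvOwn]
        · by_cases hc : c = ']' ∨ c = '}'
          · by_cases hm : pvOwn (some o) = [c]
            · have hoc : pvCloser o = c := by simpa [pvOwn] using hm
              have hstep : pvAStep (false, false, o :: s) c = (false, false, s) := by
                rcases ho with h | h <;> subst h <;> simp [pvCloser] at hoc <;> subst hoc <;>
                  simp [pvAStep]
              have E1 : (pvRec (c :: rest) (some o)).1.val = rest := by
                rw [pvRec.eq_def]; simp [hq, hb, hc, hm]
              have E2 : (pvRec (c :: rest) (some o)).2 = [] := by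
                rw [pvRec.eq_def]; simp [hq, hb, hc, hm]
              constructor
              · intro _
                rw [E1]
                simp only [List.foldl_cons]
                rw [hstep]
              · intro h; exact absurd E2 h
            · have hmc : pvCloser o ≠ c := by
                intro h; exact hm (by simp [pvOwn, h])
              have hstep : pvAStep (false, false, o :: s) c = (false, false, o :: s) := by
                rcases hc with h | h <;> subst h <;> rcases ho with h' | h' <;> subst h' <;>
                  simp [pvCloser] at hmc <;> simp [pvAStep]
              have E1 : (pvRec (c :: rest) (some o)).1.val = (pvRec rest (some o)).1.val := by
                rw [pvRec.eq_def]; simp [hq, hb, hc, hm]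
              have E2 : (pvRec (c :: rest) (some o)).2 = (pvRec rest (some o)).2 := by
                rw [pvRec.eq_def]; simp [hq, hb, hc, hm]
              have IH := ih rest hr o ho s
              constructor
              · intro h
                rw [E2] at h
                rw [E1]
                simp only [List.foldl_cons]
                rw [hstep]
                exact IH.1 h
              · intro h
                rw [E2] at h ⊢
                simp only [List.foldl_cons]
                rw [hstep]
                exact IH.2 h
          · push Not at hb hc
            have hstep : pvAStep (false, false, o :: s) c = (false, false, o :: s) := by
              by_cases hbs : c = '\\' <;>
                simp [pvAStep, hq, hb.1, hb.2, hc.1, hc.2, hbs]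
            have E1 : (pvRec (c :: rest) (some o)).1.val = (pvRec rest (some o)).1.val := by
              rw [pvRec.eq_def]; simp [hq, hb.1, hb.2, hc.1, hc.2]
            have E2 : (pvRec (c :: rest) (some o)).2 = (pvRec rest (some o)).2 := by
              rw [pvRec.eq_def]; simp [hq, hb.1, hb.2, hc.1, hc.2]
            have IH := ih rest hr o ho s
            constructor
            · intro h
              rw [E2] at h
              rw [E1]
              simp only [List.foldl_cons]
              rw [hstep]
              exact IH.1 h
            · intro h
              rw [E2] at h ⊢
              simp only [List.foldl_cons]
              rw [hstep]
              exact IH.2 h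

-- the top-level frame: B's suffix is exactly what A's epilogue appends
theorem pv_Rnone : ∀ (n : ℕ) (l : List Char), l.length < n →
    pvSfx (l.foldl pvAStep (false, false, [])) = (pvRec l none).2 := by
  intro n
  induction n with
  | zero => intro l hl; omega
  | succ n ih =>
    intro l hl
    cases l with
    | nil => rw [pvRec.eq_def]; simp [pvSfx, pvOwn]
    | cons c rest =>
      have hr : rest.length < n := by simp at hl; omega
      by_cases hq : c = '"'
      · subst hq
        have hstep : pvAStep (false, false, []) '"' = (true, false, []) := by simp [pvAStep]
        have hskf := pv_skip_fold rest ([] : List Char)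
        cases htr : (pvSkipString rest).2 with
        | true =>
          have h1 := hskf.1 htr
          rw [pvRec.eq_def]
          simp only [List.foldl_cons]
          rw [hstep]
          simp [htr, pvSfx, pvOwn, h1.1, h1.2]
        | false =>
          have h2 := hskf.2 htr
          have E2 : (pvRec ('"' :: rest) none).2 = (pvRec (pvSkipString rest).1 none).2 := by
            rw [pvRec.eq_def]; simp [htr]
          have hs1 : (pvSkipString rest).1.length < n := by
            have := pvSkipString_len rest
            omega
          rw [E2]
          simp only [List.foldl_cons]
          rw [hstep, h2]
          exact ih (pvSkipString rest).1 hs1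
      · by_cases hb : c = '[' ∨ c = '{'
        · have hstep : pvAStep (false, false, []) c = (false, false, [c]) := by
            rcases hb with h | h <;> subst h <;> simp [pvAStep]
          by_cases hsuf : (pvRec rest (some c)).2 = []
          · have IHin := (pv_Rsome (rest.length + 1) rest (Nat.lt_succ_self _) c hb []).1 hsuf
            have E2 : (pvRec (c :: rest) none).2
                = (pvRec (pvRec rest (some c)).1.val none).2 := by
              rw [pvRec.eq_def]; simp [hq, hb, hsuf]
            have hlen : (pvRec rest (some c)).1.val.length < n :=
              lt_of_le_of_lt (Nat.lt_succ_iff.mp (Nat.lt_succ_of_le (pvRec rest (some c)).1.property)) hr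
            rw [E2]
            simp only [List.foldl_cons]
            rw [hstep, IHin]
            exact ih _ hlen
          · have IHin := (pv_Rsome (rest.length + 1) rest (Nat.lt_succ_self _) c hb []).2 hsuf
            have E2 : (pvRec (c :: rest) none).2
                = (pvRec rest (some c)).2 ++ pvOwn none := by
              rw [pvRec.eq_def]; simp [hq, hb, hsuf]
            rw [E2]
            simp only [List.foldl_cons]
            rw [hstep, IHin]
            simp [pvOwn]
        · by_cases hc : c = ']' ∨ c = '}'
          · have hstep : pvAStep (false, false, []) c = (false, false, []) := by
              rcases hc with h | h <;> subst h <;> simp [pvAStep]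
            have E2 : (pvRec (c :: rest) none).2 = (pvRec rest none).2 := by
              rw [pvRec.eq_def]; simp [hq, hb, hc, pvOwn]
            rw [E2]
            simp only [List.foldl_cons]
            rw [hstep]
            exact ih rest hr
          · push Not at hb hc
            have hstep : pvAStep (false, false, []) c = (false, false, []) := by
              by_cases hbs : c = '\\' <;>
                simp [pvAStep, hq, hb.1, hb.2, hc.1, hc.2, hbs]
            have E2 : (pvRec (c :: rest) none).2 = (pvRec rest none).2 := by
              rw [pvRec.eq_def]; simp [hq, hb.1, hb.2, hc.1, hc.2]
            rw [E2]
            simp only [List.foldl_cons]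
            rw [hstep]
            exact ih rest hr

-- ===== VERDICT (by name: the statement is the Claim_ definition above) =====
theorem close_truncated_json_py_spec : Claim_equal_close_truncated_json_py := by
  intro json_text _
  unfold Spec_close_truncated_json_py close_truncated_json_py close_truncated_json_py_alt
  apply String.toList_inj.mp
  rw [pvClosers_toList]
  have h := pv_Rnone (json_text.toList.length + 1) json_text.toList (Nat.lt_succ_self _)
  rcases hf : json_text.toList.foldl pvAStep (false, false, []) with ⟨i, e, d⟩
  rw [hf] at h
  cases i <;> simp_all [pvSfx]
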